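-- pv_equiv track=rewrite | github.com/cvzwkk/utils | python/encryption/invisibleText.py | hide_message
-- ===== SOURCE A (Python) =====
-- def hide_message(cover, secret):
--     if not secret:
--         return cover
--     secret_bytes = (secret + '\x00').encode('utf-8')
--     binary = ''.join(format(b, '08b') for b in secret_bytes)
--
--     result = []
--     i = 0
--     for char in cover:
--         result.append(char)
--         if i < len(binary):
--             result.append('\u200b' if binary[i] == '1' else '\u200c')
--             i += 1
--     while i < len(binary):
--         result.append('\u200b' if binary[i] == '1' else '\u200c')
--         i += 1
--     return ''.join(result)
-- ===== SOURCE B (Python) =====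
-- def hide_message(cover, secret):
--     if not secret:
--         return cover
--     data = (secret + '\x00').encode('utf-8')
--     zwseq = ''.join('\u200b' if (b >> s) & 1 else '\u200c'
--                     for b in data for s in range(7, -1, -1))
--     m, n = len(cover), len(zwseq)
--     k = min(m, n)
--     return ''.join(
--         (cover[j // 2] if j % 2 == 0 else zwseq[j // 2]) if j < 2 * k
--         else (cover[j - k] if n < m else zwseq[j - k])
--         for j in range(m + n))
-- ===== Notes on version B (the rewrite author's own statement) =====
-- stated objective: alternative
-- what changed: B maps each secret byte straight to its eight zero-width characters (no '0'/'1' bit-string intermediate) and then builds the whole output by a closed-form positional comprehension over range(m+n), where index parity and arithmetic decide which source character goes at each position, instead of A's interleaving loop with a running index plus a trailing while loop.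
import Mathlib
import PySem

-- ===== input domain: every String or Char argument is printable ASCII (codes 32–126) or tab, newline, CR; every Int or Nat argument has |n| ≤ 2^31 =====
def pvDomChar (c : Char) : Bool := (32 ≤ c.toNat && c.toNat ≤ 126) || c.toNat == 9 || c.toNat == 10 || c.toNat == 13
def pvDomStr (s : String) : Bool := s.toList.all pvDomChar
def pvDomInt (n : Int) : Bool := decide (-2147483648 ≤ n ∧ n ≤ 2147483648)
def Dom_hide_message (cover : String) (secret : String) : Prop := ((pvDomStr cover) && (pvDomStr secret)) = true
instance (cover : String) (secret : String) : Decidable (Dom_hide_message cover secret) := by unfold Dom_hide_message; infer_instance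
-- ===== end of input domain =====

-- B maps each byte straight to zero-width chars and builds the output by a closed-form
-- positional comprehension over range(m+n) (index parity/arithmetic picks the source char),
-- instead of A's interleaving loop with a running index plus a trailing while loop
-- (objective: alternative decomposition, same cost).


-- ===== PORT A =====

-- format(b, '08b') as a list of the 8 bit characters (exact for 0 ≤ b < 256,
-- which covers the UTF-8 bytes of the ASCII domain)
def byteBits (b : Nat) : List Char :=
  (List.range 8).map (fun k => if b / 2 ^ (7 - k) % 2 = 1 then '1' else '0')

-- (secret + '\x00').encode('utf-8'): on the ASCII domain each UTF-8 byte is the code point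
def bytesOf (secret : String) : List Nat :=
  (secret.toList ++ [Char.ofNat 0]).map (fun c => c.toNat)

-- the joined 8-bit groups
def binaryOf (secret : String) : List Char :=
  (bytesOf secret).flatMap byteBits

-- "'\u200b' if bit == '1' else '\u200c'"
def zwOf (c : Char) : Char := if c = '1' then Char.ofNat 0x200B else Char.ofNat 0x200C

-- the trailing "while i < len(binary): result.append(...); i += 1"
def whileTail (binary : List Char) (i : Nat) (res : List Char) : List Char :=
  if h : i < binary.length then whileTail binary (i + 1) (res ++ [zwOf binary[i]]) else res
  termination_by binary.length - i

def hide_message (cover : String) (secret : String) : String :=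
  if secret = "" then cover
  else
    let binary := binaryOf secret
    let st := cover.toList.foldl
      (fun (st : List Char × Nat) char =>
        let res := st.1 ++ [char]
        if h : st.2 < binary.length then (res ++ [zwOf binary[st.2]], st.2 + 1) else (res, st.2))
      ([], 0)
    String.mk (whileTail binary st.2 st.1)

-- ===== PORT B =====

def hide_message_alt (cover : String) (secret : String) : String :=
  if secret = "" then cover
  else
    let data := bytesOf secret
    -- "'\u200b' if (b >> s) & 1 else '\u200c' for b in data for s in range(7,-1,-1)";
    -- (b >> s) & 1 is b / 2^s % 2 (exact on Nat)
    let zwseq := data.flatMap (fun b => (List.range 8).map (fun k =>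
      if b / 2 ^ (7 - k) % 2 = 1 then Char.ofNat 0x200B else Char.ofNat 0x200C))
    let m := cover.toList.length
    let n := zwseq.length
    let k := min m n
    String.mk ((List.range (m + n)).map (fun j =>
      if j < 2 * k then
        (if j % 2 = 0 then cover.toList.getD (j / 2) ' ' else zwseq.getD (j / 2) ' ')
      else
        (if n < m then cover.toList.getD (j - k) ' ' else zwseq.getD (j - k) ' ')))

-- ===== PRECONDITION & SPEC =====
def Spec_hide_message (cover : String) (secret : String) (out : String) : Prop := out = hide_message_alt cover secret
instance (cover : String) (secret : String) (out : String) : Decidable (Spec_hide_message cover secret out) := by unfold Spec_hide_message; infer_instance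

-- ===== CLAIM (what is proved, stated in full; the proofs are below) =====
def Claim_equal_hide_message : Prop := ∀ (cover : String) (secret : String), Dom_hide_message cover secret → Spec_hide_message cover secret (hide_message cover secret)

-- ===== LEMMAS AND PROOFS =====

-- canonical interleaving, used to connect both ports
def inter : List Char → List Char → List Char
  | [], ys => ys
  | x :: xs, [] => x :: inter xs []
  | x :: xs, y :: ys => x :: y :: inter xs ys

theorem whileTail_eq (binary : List Char) (i : Nat) (res : List Char) :
    whileTail binary i res = res ++ (binary.map zwOf).drop i := by
  induction h : binary.length - i using Nat.strong_induction_on generalizing i res with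
  | _ n ih =>
    rw [whileTail]
    split
    · next hlt =>
      rw [ih (binary.length - (i + 1)) (by omega) (i + 1) _ rfl]
      rw [List.drop_eq_getElem_cons (show i < (List.map zwOf binary).length by simpa using hlt)]
      simp
    · next hge =>
      rw [List.drop_of_length_le (show (List.map zwOf binary).length ≤ i by simpa using Nat.le_of_not_lt hge)]
      simp

theorem foldA_eq (binary : List Char) (cover : List Char) (i : Nat) (res : List Char) :
    whileTail binary
      (cover.foldl (fun (st : List Char × Nat) char =>
        let r := st.1 ++ [char]
        if _ : st.2 < binary.length then (r ++ [zwOf binary[st.2]], st.2 + 1) else (r, st.2)) (res, i)).2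
      (cover.foldl (fun (st : List Char × Nat) char =>
        let r := st.1 ++ [char]
        if _ : st.2 < binary.length then (r ++ [zwOf binary[st.2]], st.2 + 1) else (r, st.2)) (res, i)).1
    = res ++ inter cover ((binary.map zwOf).drop i) := by
  induction cover generalizing i res with
  | nil => simp [whileTail_eq, inter]
  | cons c cs ih =>
    simp only [List.foldl_cons]
    by_cases hlt : i < binary.length
    · simp only [dif_pos hlt]
      rw [ih (i + 1)]
      rw [show List.drop i (List.map zwOf binary)
            = zwOf binary[i] :: List.drop (i + 1) (List.map zwOf binary) from by
        rw [List.drop_eq_getElem_cons (by simpa using hlt)]; simp]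
      simp [inter]
    · simp only [dif_neg hlt]
      rw [ih i]
      rw [List.drop_of_length_le (show (List.map zwOf binary).length ≤ i by
        simpa using Nat.le_of_not_lt hlt)]
      simp [inter]

theorem inter_length (xs ys : List Char) : (inter xs ys).length = xs.length + ys.length := by
  induction xs generalizing ys with
  | nil => simp [inter]
  | cons x xs ih =>
    cases ys with
    | nil => simp [inter, ih]
    | cons y ys => simp [inter, ih]; omega

-- getD characterisation of the interleaving by index arithmetic
theorem inter_getD (xs ys : List Char) (j : Nat) :
    (inter xs ys).getD j ' ' =
      if j < 2 * min xs.length ys.length then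
        (if j % 2 = 0 then xs.getD (j / 2) ' ' else ys.getD (j / 2) ' ')
      else
        (if ys.length < xs.length then xs.getD (j - ys.length) ' ' else ys.getD (j - xs.length) ' ') := by
  induction xs generalizing ys j with
  | nil => simp [inter]
  | cons x xs ih =>
    cases ys with
    | nil =>
      have hnil : inter xs [] = xs := by
        clear ih; induction xs with
        | nil => simp [inter]
        | cons a as iih => simp [inter, iih]
      simp [inter, hnil]
    | cons y ys =>
      match j with
      | 0 => simp [inter]
      | 1 =>
        show y = _
        rw [List.length_cons, List.length_cons, if_pos (by omega)]
        norm_num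
      | (j' + 2) =>
        show (inter xs ys).getD j' ' ' = _
        rw [ih ys j']
        have hmin : min (xs.length + 1) (ys.length + 1) = min xs.length ys.length + 1 := by omega
        simp only [List.length_cons, hmin]
        by_cases h1 : j' < 2 * min xs.length ys.length
        · have h2 : j' + 2 < 2 * (min xs.length ys.length + 1) := by omega
          rw [if_pos h1, if_pos h2]
          have hm : (j' + 2) % 2 = j' % 2 := by omega
          have hd : (j' + 2) / 2 = j' / 2 + 1 := by omega
          rw [hm, hd]
          by_cases he : j' % 2 = 0 <;> simp [he]
        · have h2 : ¬ (j' + 2 < 2 * (min xs.length ys.length + 1)) := by omega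
          rw [if_neg h1, if_neg h2]
          by_cases hlt : ys.length < xs.length
          · have : ys.length + 1 < xs.length + 1 := by omega
            rw [if_pos hlt, if_pos this]
            have : j' + 2 - (ys.length + 1) = (j' - ys.length) + 1 := by omega
            rw [this]; simp
          · have : ¬ (ys.length + 1 < xs.length + 1) := by omega
            rw [if_neg hlt, if_neg this]
            have : j' + 2 - (xs.length + 1) = (j' - xs.length) + 1 := by omega
            rw [this]; simp

-- B's positional comprehension produces exactly the interleaving
theorem range_map_eq_inter (cov zwl : List Char) :
    (List.range (cov.length + zwl.length)).map (fun j =>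
      if j < 2 * min cov.length zwl.length then
        (if j % 2 = 0 then cov.getD (j / 2) ' ' else zwl.getD (j / 2) ' ')
      else
        (if zwl.length < cov.length then cov.getD (j - min cov.length zwl.length) ' '
         else zwl.getD (j - min cov.length zwl.length) ' '))
    = inter cov zwl := by
  apply List.ext_getElem
  · simp [inter_length]
  · intro j hj1 hj2
    simp only [List.getElem_map, List.getElem_range]
    rw [← List.getD_eq_getElem (inter cov zwl) ' ' hj2, inter_getD]
    have hjlt : j < cov.length + zwl.length := by
      have := hj2; rw [inter_length] at this; exact this
    by_cases h1 : j < 2 * min cov.length zwl.length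
    · rw [if_pos h1, if_pos h1]
    · rw [if_neg h1, if_neg h1]
      by_cases h3 : zwl.length < cov.length
      · rw [if_pos h3, if_pos h3,
          show min cov.length zwl.length = zwl.length from by omega]
      · rw [if_neg h3, if_neg h3,
          show min cov.length zwl.length = cov.length from by omega]

-- B's fused byte→zero-width sequence is A's mapped binary string
theorem zwseq_eq (bs : List Nat) :
    bs.flatMap (fun b => (List.range 8).map (fun k =>
        if b / 2 ^ (7 - k) % 2 = 1 then Char.ofNat 0x200B else Char.ofNat 0x200C))
      = (bs.flatMap byteBits).map zwOf := by
  rw [List.map_flatMap]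
  apply List.flatMap_congr
  intro b _
  rw [byteBits, List.map_map]
  apply List.map_congr_left
  intro k _
  by_cases h : b / 2 ^ (7 - k) % 2 = 1 <;> simp [h, zwOf, Function.comp]

theorem hide_message_eq_alt (cover secret : String) :
    hide_message cover secret = hide_message_alt cover secret := by
  unfold hide_message hide_message_alt
  split
  · rfl
  · simp only
    rw [foldA_eq (binaryOf secret) cover.toList 0 [], List.drop_zero, List.nil_append]
    congr 1
    rw [zwseq_eq (bytesOf secret)]
    exact (range_map_eq_inter cover.toList (((bytesOf secret).flatMap byteBits).map zwOf)).symm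

-- ===== VERDICT (by name: the statement is the Claim_ definition above) =====
theorem hide_message_spec : Claim_equal_hide_message := by
  intro cover secret _
  unfold Spec_hide_message
  exact hide_message_eq_alt cover secret
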